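-- pv_equiv track=rewrite | github.com/heelee912/Learn-Japanese-Kanji-with-Anime | ass batch.py | build_segments_singletrack
-- ===== SOURCE A (Python) =====
-- def build_segments_singletrack(k_list, j_list):
--     """KR/JP 컷포인트 합쳐 [a,b)마다 최신 시작 텍스트 선택, 동일 페이로드는 연장 병합."""
--     points = set()
--     for s, e, _ in k_list + j_list:
--         points.add(s)
--         points.add(e)
--     cuts = sorted(points)
--
--     def active_lines(ev_list, a, b):
--         cands = [(s, e, t) for (s, e, t) in ev_list if s < b and e > a]
--         if not cands:
--             return None
--         latest = max(s for s, _, _ in cands)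
--         lines = []
--         for s, e, t in cands:
--             if s == latest:
--                 for ln in t.splitlines():
--                     ln = ln.strip()
--                     if ln and (not lines or lines[-1] != ln):
--                         lines.append(ln)
--         return lines or None
--
--     segs = []
--     for i in range(len(cuts) - 1):
--         a, b = cuts[i], cuts[i + 1]
--         if b - a < 1:
--             continue
--         ko = active_lines(k_list, a, b)
--         jp = active_lines(j_list, a, b)
--         segs.append((a, b, ko, jp))
--     return segs
-- ===== SOURCE B (Python) =====
-- def build_segments_singletrack(k_list, j_list):
--     """Same result via one running-max pass per interval (no candidate list, no separate max pass)."""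
--     cuts = sorted({p for s, e, _ in k_list + j_list for p in (s, e)})
--
--     def _push(lines, text):
--         for ln in text.splitlines():
--             ln = ln.strip()
--             if ln and (not lines or lines[-1] != ln):
--                 lines.append(ln)
--         return lines
--
--     def active(ev_list, a, b):
--         best, lines = None, []
--         for s, e, t in ev_list:
--             if s < b and e > a:
--                 if best is None or s > best:
--                     best, lines = s, _push([], t)
--                 elif s == best:
--                     lines = _push(lines, t)
--         if best is None:
--             return None
--         return lines or None
--
--     return [(a, b, active(k_list, a, b), active(j_list, a, b))
--             for a, b in zip(cuts, cuts[1:])]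
-- ===== Notes on version B (the rewrite author's own statement) =====
-- stated objective: alternative
-- what changed: Per interval, B replaces A's three passes (build a candidate list, take max of starts, re-scan appending the max-start lines) by a single running-max fold over the events with a (best, lines) accumulator, drops the impossible b-a<1 skip (cut points are distinct), and emits segments by zipping consecutive cuts instead of index arithmetic.
import Mathlib
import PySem

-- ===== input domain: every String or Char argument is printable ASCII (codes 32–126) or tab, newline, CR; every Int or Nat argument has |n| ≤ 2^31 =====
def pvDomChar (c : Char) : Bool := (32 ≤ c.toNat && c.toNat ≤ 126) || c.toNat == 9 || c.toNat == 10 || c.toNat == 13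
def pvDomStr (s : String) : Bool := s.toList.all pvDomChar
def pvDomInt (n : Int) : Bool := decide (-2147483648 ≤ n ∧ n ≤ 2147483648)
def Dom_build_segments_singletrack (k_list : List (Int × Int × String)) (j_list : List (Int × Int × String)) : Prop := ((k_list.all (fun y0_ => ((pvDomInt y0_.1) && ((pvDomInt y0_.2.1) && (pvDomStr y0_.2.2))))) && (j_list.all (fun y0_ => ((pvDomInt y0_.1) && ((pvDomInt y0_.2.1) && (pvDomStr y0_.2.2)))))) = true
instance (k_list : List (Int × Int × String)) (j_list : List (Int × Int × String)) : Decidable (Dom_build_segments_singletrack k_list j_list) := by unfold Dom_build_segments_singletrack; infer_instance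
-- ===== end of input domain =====

-- B replaces A's three passes per interval (filter into a candidate list, max over starts, re-scan for
-- the max) by ONE running-max pass, and drops the impossible `b - a < 1` skip; objective: simpler/alternative.

-- ===== PORT A =====
-- the shared inner line loop of both Pythons:
-- 'for ln in t.splitlines(): ln = ln.strip(); if ln and (not lines or lines[-1] != ln): lines.append(ln)'
def pushLines (lines : List String) (t : String) : List String :=
  (PySem.Str.splitlines t).foldl (fun L ln0 =>
    let ln := PySem.Str.strip ln0
    if ln ≠ "" ∧ (L = [] ∨ L.getLast? ≠ some ln) then L ++ [ln] else L) lines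

def activeA (ev_list : List (Int × Int × String)) (a b : Int) : Option (List String) :=
  let cands := ev_list.filter (fun x => decide (x.1 < b ∧ a < x.2.1))
  if cands = [] then none
  else
    match PySem.List.max? (cands.map (fun x => x.1)) (fun s => s) with
    | none => none  -- unreachable: cands ≠ []
    | some latest =>
      let lines := cands.foldl (fun L x => if x.1 = latest then pushLines L x.2.2 else L) []
      if lines = [] then none else some lines

def build_segments_singletrack (k_list : List (Int × Int × String)) (j_list : List (Int × Int × String)) : List (Int × Int × Option (List String) × Option (List String)) :=
  let pts : PySem.Set Int := (k_list ++ j_list).foldl (fun pts x => PySem.Set.add (PySem.Set.add pts x.1) x.2.1) []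
  let cuts := PySem.List.sorted pts (fun x => x) false
  (PySem.List.pyRange 0 ((cuts.length : Int) - 1) 1).foldl (fun segs i =>
    let a := PySem.List.pyGetD cuts i 0        -- i and i+1 are provably in range
    let b := PySem.List.pyGetD cuts (i + 1) 0
    if b - a < 1 then segs
    else segs ++ [(a, b, activeA k_list a b, activeA j_list a b)]) []

-- ===== PORT B =====
def activeB (ev_list : List (Int × Int × String)) (a b : Int) : Option (List String) :=
  let st := ev_list.foldl (fun (st : Option Int × List String) x =>
    if x.1 < b ∧ a < x.2.1 then
      match st.1 with
      | none => (some x.1, pushLines [] x.2.2)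
      | some m =>
        if m < x.1 then (some x.1, pushLines [] x.2.2)
        else if x.1 = m then (some m, pushLines st.2 x.2.2)
        else st
    else st) (none, [])
  match st.1 with
  | none => none
  | some _ => if st.2 = [] then none else some st.2

def build_segments_singletrack_alt (k_list : List (Int × Int × String)) (j_list : List (Int × Int × String)) : List (Int × Int × Option (List String) × Option (List String)) :=
  let cuts := PySem.List.sorted (PySem.Set.ofList ((k_list ++ j_list).flatMap (fun x => [x.1, x.2.1]))) (fun x => x) false
  (cuts.zip (PySem.List.slice cuts (some 1) none)).map (fun ab =>
    (ab.1, ab.2, activeB k_list ab.1 ab.2, activeB j_list ab.1 ab.2))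

-- ===== PRECONDITION & SPEC =====
def Spec_build_segments_singletrack (k_list : List (Int × Int × String)) (j_list : List (Int × Int × String)) (out : List (Int × Int × Option (List String) × Option (List String))) : Prop := out = build_segments_singletrack_alt k_list j_list
instance (k_list : List (Int × Int × String)) (j_list : List (Int × Int × String)) (out : List (Int × Int × Option (List String) × Option (List String))) : Decidable (Spec_build_segments_singletrack k_list j_list out) := by unfold Spec_build_segments_singletrack; infer_instance

-- ===== CLAIM (what is proved, stated in full; the proofs are below) =====
def Claim_equal_build_segments_singletrack : Prop := ∀ (k_list : List (Int × Int × String)) (j_list : List (Int × Int × String)), Dom_build_segments_singletrack k_list j_list → Spec_build_segments_singletrack k_list j_list (build_segments_singletrack k_list j_list)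

-- ===== LEMMAS AND PROOFS =====

-- the two ways of collecting the cut points build the same Set
lemma pts_eq (l : List (Int × Int × String)) (s : PySem.Set Int) :
    l.foldl (fun pts x => PySem.Set.add (PySem.Set.add pts x.1) x.2.1) s
      = (l.flatMap (fun x => [x.1, x.2.1])).foldl PySem.Set.add s := by
  induction l generalizing s with
  | nil => rfl
  | cons x t ih => simp [List.flatMap_cons, ih]

-- A's per-interval lines fold, as a function of the chosen start
def linesFor (M : Int) (ys : List (Int × Int × String)) : List String :=
  ys.foldl (fun L x => if x.1 = M then pushLines L x.2.2 else L) []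

lemma linesFor_eq_nil (M : Int) (ys : List (Int × Int × String)) (h : ∀ y ∈ ys, y.1 ≠ M) :
    linesFor M ys = [] := by
  induction ys with
  | nil => rfl
  | cons y t ih =>
    simp only [linesFor, List.foldl_cons, if_neg (h y (List.mem_cons_self))]
    exact ih (fun z hz => h z (List.mem_cons_of_mem _ hz))

lemma linesFor_append (M : Int) (l : List (Int × Int × String)) (x : Int × Int × String) :
    linesFor M (l ++ [x]) = if x.1 = M then pushLines (linesFor M l) x.2.2 else linesFor M l := by
  simp only [linesFor, List.foldl_append, List.foldl_cons, List.foldl_nil]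

-- the single running-max pass over the candidates computes A's (latest, lines)
lemma core (c : Int × Int × String) (t : List (Int × Int × String)) :
    (c :: t).foldl (fun (st : Option Int × List String) x =>
        match st.1 with
        | none => (some x.1, pushLines [] x.2.2)
        | some m =>
          if m < x.1 then (some x.1, pushLines [] x.2.2)
          else if x.1 = m then (some m, pushLines st.2 x.2.2)
          else st) (none, [])
      = (some ((t.map (fun x => x.1)).foldl max c.1),
         linesFor ((t.map (fun x => x.1)).foldl max c.1) (c :: t)) := by
  induction t using List.reverseRecOn with
  | nil =>
    simp [linesFor]
  | append_singleton ts x ih =>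
    have hM := PySem.List.le_foldl_max (ts.map (fun x => x.1)) c.1
    set M := (ts.map (fun x => x.1)).foldl max c.1 with hMdef
    have hall : ∀ y ∈ c :: ts, y.1 ≤ M := by
      intro y hy
      rcases List.mem_cons.mp hy with h | h
      · exact h ▸ hM.1
      · exact hM.2 _ (List.mem_map_of_mem h)
    have hM' : ((ts ++ [x]).map (fun x => x.1)).foldl max c.1 = max M x.1 := by
      simp [List.foldl_append, hMdef]
    rw [show c :: (ts ++ [x]) = (c :: ts) ++ [x] by simp, List.foldl_append, ih, hM']
    simp only [List.foldl_cons, List.foldl_nil]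
    rcases lt_trichotomy M x.1 with hlt | heq | hgt
    · rw [if_pos hlt, max_eq_right hlt.le, linesFor_append, if_pos rfl]
      rw [linesFor_eq_nil x.1 (c :: ts) (fun y hy => ne_of_lt (lt_of_le_of_lt (hall y hy) hlt))]
    · rw [if_neg (by omega), if_pos heq.symm, max_eq_left heq.ge, linesFor_append, if_pos heq.symm]
    · rw [if_neg (by omega), if_neg (by omega), max_eq_left hgt.le, linesFor_append,
        if_neg (by omega)]

-- per-interval equality
lemma active_eq (ev : List (Int × Int × String)) (a b : Int) : activeA ev a b = activeB ev a b := by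
  unfold activeA activeB
  have hB : ev.foldl (fun (st : Option Int × List String) x =>
      if x.1 < b ∧ a < x.2.1 then
        match st.1 with
        | none => (some x.1, pushLines [] x.2.2)
        | some m =>
          if m < x.1 then (some x.1, pushLines [] x.2.2)
          else if x.1 = m then (some m, pushLines st.2 x.2.2)
          else st
      else st) (none, [])
      = (ev.filter (fun x => decide (x.1 < b ∧ a < x.2.1))).foldl (fun (st : Option Int × List String) x =>
        match st.1 with
        | none => (some x.1, pushLines [] x.2.2)
        | some m =>
          if m < x.1 then (some x.1, pushLines [] x.2.2)
          else if x.1 = m then (some m, pushLines st.2 x.2.2)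
          else st) (none, []) := by
    rw [List.foldl_filter]
    apply PySem.List.foldl_congr_mem
    intro acc x _
    by_cases h : x.1 < b ∧ a < x.2.1 <;> simp [h]
  simp only [hB]
  cases hc : ev.filter (fun x => decide (x.1 < b ∧ a < x.2.1)) with
  | nil => simp
  | cons c t =>
    rw [if_neg (by simp)]
    rw [core]
    have : PySem.List.max? ((c :: t).map (fun x => x.1)) (fun s => s)
        = some ((t.map (fun x => x.1)).foldl max c.1) := by
      rw [List.map_cons, PySem.List.max?_id_cons]
    rw [this]
    rfl

-- outer loop: the index loop with its impossible skip equals the zip map, on strictly increasing cuts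
lemma outer_eq {β : Type} (cuts : List Int) (hp : cuts.Pairwise (· < ·)) (g : Int → Int → β) :
    (PySem.List.pyRange 0 ((cuts.length : Int) - 1) 1).foldl (fun segs i =>
        if PySem.List.pyGetD cuts (i + 1) 0 - PySem.List.pyGetD cuts i 0 < 1 then segs
        else segs ++ [g (PySem.List.pyGetD cuts i 0) (PySem.List.pyGetD cuts (i + 1) 0)]) []
      = (cuts.zip cuts.tail).map (fun ab => g ab.1 ab.2) := by
  have hpg := List.pairwise_iff_getElem.mp hp
  have hlen : ((cuts.length : Int) - 1 - 0).toNat = cuts.length - 1 := by omega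
  rw [PySem.List.pyRange_one, hlen, List.foldl_map]
  have hstep : ∀ (segs : List β), ∀ k ∈ List.range (cuts.length - 1),
      (fun segs (i : Int) =>
        if PySem.List.pyGetD cuts (i + 1) 0 - PySem.List.pyGetD cuts i 0 < 1 then segs
        else segs ++ [g (PySem.List.pyGetD cuts i 0) (PySem.List.pyGetD cuts (i + 1) 0)]) segs ((0 : Int) + (k : Int))
      = segs ++ [g (cuts.getD k 0) (cuts.getD (k + 1) 0)] := by
    intro segs k hk
    have hk : k < cuts.length - 1 := List.mem_range.mp hk
    have h1 : k < cuts.length := by omega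
    have h2 : k + 1 < cuts.length := by omega
    have ha : PySem.List.pyGetD cuts ((0 : Int) + (k : Int)) 0 = cuts.getD k 0 := by
      rw [zero_add, PySem.List.pyGetD_natCast]
    have hb : PySem.List.pyGetD cuts ((0 : Int) + (k : Int) + 1) 0 = cuts.getD (k + 1) 0 := by
      rw [zero_add, show ((k : Int) + 1) = ((k + 1 : Nat) : Int) by push_cast; ring,
        PySem.List.pyGetD_natCast]
    simp only [ha, hb]
    rw [if_neg]
    have := hpg k (k + 1) h1 h2 (by omega)
    rw [List.getD_eq_getElem cuts 0 h1, List.getD_eq_getElem cuts 0 h2]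
    omega
  rw [PySem.List.foldl_congr_mem _ _
      (fun segs k => segs ++ [g (cuts.getD k 0) (cuts.getD (k + 1) 0)]) []
      (fun acc x hx => hstep acc x hx),
    PySem.List.foldl_append_singleton_eq_map]
  apply List.ext_getElem
  · simp only [List.nil_append, List.length_map, List.length_range, List.length_zip,
      List.length_tail]; omega
  · intro i hi1 hi2
    simp only [List.nil_append, List.getElem_map, List.getElem_range, List.getElem_zip]
    have h1 : i < cuts.length := by simp at hi1; omega
    have h2 : i + 1 < cuts.length := by simp at hi1; omega
    rw [List.getD_eq_getElem cuts 0 h1, List.getD_eq_getElem cuts 0 h2, List.getElem_tail]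

-- ===== VERDICT (by name: the statement is the Claim_ definition above) =====
theorem build_segments_singletrack_spec : Claim_equal_build_segments_singletrack := by
  intro k j _
  unfold Spec_build_segments_singletrack build_segments_singletrack build_segments_singletrack_alt
  simp only [pts_eq, ← PySem.Set.ofList_eq_foldl, PySem.List.slice_from_one, active_eq]
  exact outer_eq _ (PySem.List.sorted_ofList_pairwise_lt _)
    (fun a b => (a, b, activeB k a b, activeB j a b))
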